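-- pv_equiv track=rewrite | github.com/HongDuy119/CODE_PYTHON | PY01039 - KIỂM TRA SỐ ĐẸP.py | check
-- ===== SOURCE A (Python) =====
-- def check(a):
--     for i in range(2,len(a),2):
--         if a[i]!=a[0]:
--             return False
--     for i in range(1,len(a),2):
--         if a[i]!=a[1]:
--             return False
--     return True
-- ===== SOURCE B (Python) =====
-- def check(a):
--     # alternating pattern <=> every element equals the one two positions before it
--     return a[2:] == a[:-2]
-- ===== Notes on version B (the rewrite author's own statement) =====
-- stated objective: idiomatic
-- what changed: Replaces the two strided index loops (even positions against the first element, odd positions against the second) by a single shift-and-compare of the list with itself offset by two.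
import Mathlib
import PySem

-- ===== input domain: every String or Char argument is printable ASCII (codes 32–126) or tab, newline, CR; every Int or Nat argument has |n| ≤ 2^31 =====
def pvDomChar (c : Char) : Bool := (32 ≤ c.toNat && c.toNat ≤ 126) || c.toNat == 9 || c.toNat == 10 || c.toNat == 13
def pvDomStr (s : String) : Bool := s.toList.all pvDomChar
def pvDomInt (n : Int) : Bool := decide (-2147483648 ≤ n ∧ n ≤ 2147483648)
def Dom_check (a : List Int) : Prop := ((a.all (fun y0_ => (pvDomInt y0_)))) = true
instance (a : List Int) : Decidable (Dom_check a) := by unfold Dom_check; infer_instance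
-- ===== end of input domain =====

-- B replaces A's two strided index loops (even positions vs the first element, odd
-- positions vs the second) by one shift-and-compare slice equality; objective: idiomatic.

-- ===== PORT A =====
-- one strided for-loop with early 'return False': each element at an index drawn from
-- range(r, len(a), 2) is compared against the reference element at index r; the loop
-- indices are always in range, so pyGetD is exact
def checkScan (a : List Int) (r : Int) : List Int → Bool
  | [] => true
  | i :: rest =>
    if PySem.List.pyGetD a i 0 ≠ PySem.List.pyGetD a r 0 then false
    else checkScan a r rest

def check (a : List Int) : Bool :=
  checkScan a 0 (PySem.List.pyRange 2 a.length 2) &&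
  checkScan a 1 (PySem.List.pyRange 1 a.length 2)

-- ===== PORT B =====
-- Source B: return a[2:] == a[:-2]
def check_alt (a : List Int) : Bool :=
  PySem.List.slice a (some 2) none == PySem.List.slice a none (some (-2))

-- ===== PRECONDITION & SPEC =====
def Spec_check (a : List Int) (out : Bool) : Prop := out = check_alt a
instance (a : List Int) (out : Bool) : Decidable (Spec_check a out) := by unfold Spec_check; infer_instance

-- ===== CLAIM (what is proved, stated in full; the proofs are below) =====
def Claim_equal_check : Prop := ∀ (a : List Int), Dom_check a → Spec_check a (check a)

-- ===== LEMMAS AND PROOFS =====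

-- common characterisation: every element equals the one two positions before it
def Shift2 (a : List Int) : Prop := ∀ i : Nat, i + 2 < a.length → a.getD (i + 2) 0 = a.getD i 0

theorem checkScan_iff (a : List Int) (r : Int) (l : List Int) :
    checkScan a r l = true ↔ ∀ i ∈ l, PySem.List.pyGetD a i 0 = PySem.List.pyGetD a r 0 := by
  induction l with
  | nil => simp [checkScan]
  | cons x xs ih =>
    simp only [checkScan, List.mem_cons]
    by_cases h : PySem.List.pyGetD a x 0 = PySem.List.pyGetD a r 0
    · simp [h, ih]
    · simp [h]

theorem pyGetD_nat (a : List Int) (j : Nat) :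
    PySem.List.pyGetD a (j : Int) 0 = a.getD j 0 := by
  rw [PySem.List.pyGetD_of_nonneg a 0 (by positivity)]
  simp

-- a loop of A passes iff its congruence class is constant (class r mod 2, reference a[r])
def ClassP (a : List Int) (r : Nat) : Prop :=
  ∀ j : Nat, j < a.length → j % 2 = r % 2 → a.getD j 0 = a.getD r 0

theorem scan_iff_classP (a : List Int) (r : Nat) (hr : r < 2) :
    checkScan a r (PySem.List.pyRange (r + 2) a.length 2) = true ↔ ClassP a r := by
  rw [checkScan_iff]
  constructor
  · intro h j hj hmod
    by_cases hjr : j = r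
    · rw [hjr]
    · have hge : r + 2 ≤ j := by omega
      have hmem : (j : Int) ∈ PySem.List.pyRange ((r : Int) + 2) a.length 2 := by
        rw [PySem.List.mem_pyRange_iff_of_pos (by norm_num)]
        refine ⟨by exact_mod_cast hge, by exact_mod_cast hj, ?_⟩
        omega
      have := h _ hmem
      rwa [pyGetD_nat, pyGetD_nat] at this
  · intro h i hi
    rw [PySem.List.mem_pyRange_iff_of_pos (by norm_num)] at hi
    obtain ⟨h1, h2, h3⟩ := hi
    have h0 : 0 ≤ i := by omega
    obtain ⟨j, rfl⟩ := Int.eq_ofNat_of_zero_le h0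
    rw [pyGetD_nat, pyGetD_nat]
    exact h j (by exact_mod_cast h2) (by omega)

theorem check_iff_classes (a : List Int) : check a = true ↔ ClassP a 0 ∧ ClassP a 1 := by
  unfold check
  rw [Bool.and_eq_true]
  have e0 : ((0:Nat) : Int) + 2 = 2 := by norm_num
  have e1 : ((1:Nat) : Int) + 2 = 1 + 2 := by norm_num
  constructor
  · rintro ⟨hA, hB⟩
    constructor
    · rw [← scan_iff_classP a 0 (by norm_num)]; simpa using hA
    · rw [← scan_iff_classP a 1 (by norm_num)]
      -- range(1, n, 2) and range(3, n, 2) give the same loop outcome: both say the odd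
      -- class is constant; index 1 itself trivially equals a[1]
      rw [checkScan_iff] at hB ⊢
      intro i hi
      apply hB
      rw [PySem.List.mem_pyRange_iff_of_pos (by norm_num)] at hi ⊢
      obtain ⟨h1, h2, h3⟩ := hi
      exact ⟨by omega, h2, by omega⟩
  · rintro ⟨h0, h1⟩
    constructor
    · rw [checkScan_iff]
      intro i hi
      rw [PySem.List.mem_pyRange_iff_of_pos (by norm_num)] at hi
      obtain ⟨ha, hb, hc⟩ := hi
      obtain ⟨j, rfl⟩ := Int.eq_ofNat_of_zero_le (by omega : (0:Int) ≤ i)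
      have hz : PySem.List.pyGetD a (0:Int) 0 = a.getD 0 0 := by simpa using pyGetD_nat a 0
      rw [pyGetD_nat, hz]
      exact h0 j (by exact_mod_cast hb) (by omega)
    · rw [checkScan_iff]
      intro i hi
      rw [PySem.List.mem_pyRange_iff_of_pos (by norm_num)] at hi
      obtain ⟨ha, hb, hc⟩ := hi
      obtain ⟨j, rfl⟩ := Int.eq_ofNat_of_zero_le (by omega : (0:Int) ≤ i)
      have hz : PySem.List.pyGetD a (1:Int) 0 = a.getD 1 0 := by simpa using pyGetD_nat a 1
      rw [pyGetD_nat, hz]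
      exact h1 j (by exact_mod_cast hb) (by omega)

theorem shift2_mod (a : List Int) (h : Shift2 a) :
    ∀ k, k < a.length → a.getD k 0 = a.getD (k % 2) 0 := by
  intro k
  induction k using Nat.strong_induction_on with
  | _ k ih =>
    intro hk
    by_cases h2 : k < 2
    · rw [Nat.mod_eq_of_lt h2]
    · have hk2 : k - 2 + 2 = k := by omega
      have hstep := h (k - 2) (by omega)
      rw [hk2] at hstep
      rw [hstep, ih (k - 2) (by omega) (by omega)]
      congr 1
      omega

theorem classes_iff_shift2 (a : List Int) : (ClassP a 0 ∧ ClassP a 1) ↔ Shift2 a := by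
  constructor
  · rintro ⟨h0, h1⟩ i hi
    rcases Nat.even_or_odd i with he | ho
    · have hm : i % 2 = 0 := Nat.even_iff.mp he
      rw [h0 (i + 2) hi (by omega), h0 i (by omega) (by omega)]
    · have hm : i % 2 = 1 := Nat.odd_iff.mp ho
      rw [h1 (i + 2) hi (by omega), h1 i (by omega) (by omega)]
  · intro h
    constructor
    · intro j hj hm
      rw [shift2_mod a h j hj, hm]
    · intro j hj hm
      rw [shift2_mod a h j hj, hm]

theorem check_iff_shift2 (a : List Int) : check a = true ↔ Shift2 a := by
  rw [check_iff_classes, classes_iff_shift2]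

theorem alt_iff_shift2 (a : List Int) : check_alt a = true ↔ Shift2 a := by
  unfold check_alt
  rw [beq_iff_eq]
  rw [PySem.List.slice_from a (by norm_num : (0:Int) ≤ 2)]
  rw [PySem.List.slice_to_neg_ofNat a 2 (by norm_num)]
  have htn : (2 : Int).toNat = 2 := rfl
  rw [htn]
  constructor
  · intro h i hi
    have hlen : i < (a.take (a.length - 2)).length := by
      simp [List.length_take]; omega
    have := congrArg (fun l => l.getD i (0:Int)) h
    simp only at this
    rw [List.getD_eq_getElem _ _ (by simp; omega), List.getD_eq_getElem _ _ hlen] at this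
    rw [List.getElem_drop, List.getElem_take] at this
    rw [List.getD_eq_getElem _ _ hi, List.getD_eq_getElem _ _ (by omega)]
    calc a[i + 2] = a[2 + i]'(by omega) := by congr 1; omega
      _ = a[i]'(by omega) := this
  · intro h
    apply List.ext_getElem
    · simp
    · intro i h1 h2
      rw [List.getElem_drop, List.getElem_take]
      have hlen : i + 2 < a.length := by simp at h2; omega
      have := h i hlen
      rw [List.getD_eq_getElem _ _ hlen, List.getD_eq_getElem _ _ (by omega)] at this
      calc a[2 + i]'(by omega) = a[i + 2]'(by omega) := by congr 1; omega
        _ = a[i]'(by omega) := this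

-- ===== VERDICT (by name: the statement is the Claim_ definition above) =====
theorem check_spec : Claim_equal_check := by
  intro a _
  unfold Spec_check
  have h1 := check_iff_shift2 a
  have h2 := alt_iff_shift2 a
  cases hA : check a <;> cases hB : check_alt a <;> simp_all
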